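-- pv_equiv track=rewrite | github.com/AnachronisticTech/GraphIDE | FizzBuzzProject/parse_file.py | remove_in_line_strings
-- ===== SOURCE A (Python) =====
-- def remove_in_line_strings(line):
--
--     positions = []
--     for i in range(len(line)):
--         if line[i] == "\"" and line [i-1] != "\\":
--             positions.append(i)
--
--     new_line = ""
--
--     del_mode = False
--     for j in range(len(line)):
--
--         ignore_just_once = False
--         if len(positions) > 0 and j == positions[0]:
--             del_mode = not del_mode
--             positions = positions[1:]
--             new_line += "_"
--             ignore_just_once = True
--
--         if not ignore_just_once:
--             if del_mode:
--                 new_line += "_"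
--             else:
--                 new_line += line[j]
--
--     return new_line
-- ===== SOURCE B (Python) =====
-- def remove_in_line_strings(line):
--     # Region-fill over quote pairs instead of A's char-by-char parity-toggling sweep.
--     positions = [i for i, c in enumerate(line)
--                  if c == '"' and line[i - 1] != '\\']
--     chars = list(line)
--     k = 0
--     while k < len(positions):
--         start = positions[k]
--         end = positions[k + 1] if k + 1 < len(positions) else len(line) - 1
--         for i in range(start, end + 1):
--             chars[i] = '_'
--         k += 2
--     return ''.join(chars)
-- ===== Notes on version B (the rewrite author's own statement) =====
-- stated objective: alternative
-- what changed: Replaces A's stateful char-by-char parity-toggling sweep (with a shrinking positions list and per-character string concatenation threaded through the loop) by a comprehension collecting quote positions followed by an in-place region-fill over a char list that consumes the positions two at a time, blanking each inclusive quote-pair range (and an unpaired final quote to end of line).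
import Mathlib
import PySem

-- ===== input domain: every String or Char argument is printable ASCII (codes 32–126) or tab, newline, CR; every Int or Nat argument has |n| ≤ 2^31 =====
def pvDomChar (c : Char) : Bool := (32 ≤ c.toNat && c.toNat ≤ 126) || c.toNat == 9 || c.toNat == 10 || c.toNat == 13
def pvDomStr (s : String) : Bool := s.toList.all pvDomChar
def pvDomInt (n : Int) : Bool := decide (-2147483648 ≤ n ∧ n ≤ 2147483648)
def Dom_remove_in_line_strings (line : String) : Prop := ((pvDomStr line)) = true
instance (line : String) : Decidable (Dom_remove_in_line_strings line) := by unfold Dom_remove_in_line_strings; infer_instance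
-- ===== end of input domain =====

-- B replaces A's parity-toggling character sweep by a region-fill over quote pairs; objective: alternative decomposition.

-- ===== PORT A =====
-- one step of A's second loop (j = loop index; all indices are in range, so pyGetD's default is never used)
def stepA (cs : List Char) (st : List Int × Bool × List Char) (j : Int) : List Int × Bool × List Char :=
  match st with
  | (ps, dm, nl) =>
    match ps with
    | p :: rest =>
      if j = p then (rest, !dm, nl ++ ['_'])
      else if dm then (p :: rest, dm, nl ++ ['_'])
      else (p :: rest, dm, nl ++ [PySem.List.pyGetD cs j ' '])
    | [] =>
      if dm then ([], dm, nl ++ ['_'])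
      else ([], dm, nl ++ [PySem.List.pyGetD cs j ' '])

def remove_in_line_strings (line : String) : String :=
  let cs := line.toList
  -- for i in range(len(line)): if line[i] == '"' and line[i-1] != '\\': positions.append(i)
  let positions := (PySem.List.pyRange 0 (cs.length : Int) 1).foldl
    (fun ps i => if PySem.List.pyGetD cs i ' ' == '"' && PySem.List.pyGetD cs (i - 1) ' ' != '\\'
                 then ps ++ [i] else ps) []
  let st := (PySem.List.pyRange 0 (cs.length : Int) 1).foldl (stepA cs) (positions, false, [])
  String.ofList st.2.2

-- ===== PORT B =====
-- for i in range(a, b+1): chars[i] = '_'   (indices are always in range here)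
def blankRange (cs : List Char) (a b : Int) : List Char :=
  (PySem.List.pyRange a (b + 1) 1).foldl (fun l i => PySem.List.pySetD l i '_') cs

-- the while-loop of Source B: consume positions two at a time, blanking each region
def fillPairs (n : Int) : List Int → List Char → List Char
  | [], cs => cs
  | [p], cs => blankRange cs p (n - 1)
  | p :: q :: rest, cs => fillPairs n rest (blankRange cs p q)

def remove_in_line_strings_alt (line : String) : String :=
  let cs := line.toList
  let positions := ((PySem.List.enumerate cs 0).filter
    (fun pc => pc.2 == '"' && PySem.List.pyGetD cs (pc.1 - 1) ' ' != '\\')).map (·.1)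
  String.ofList (fillPairs (cs.length : Int) positions cs)

-- ===== PRECONDITION & SPEC =====
def Spec_remove_in_line_strings (line : String) (out : String) : Prop := out = remove_in_line_strings_alt line
instance (line : String) (out : String) : Decidable (Spec_remove_in_line_strings line out) := by unfold Spec_remove_in_line_strings; infer_instance

-- ===== CLAIM (what is proved, stated in full; the proofs are below) =====
def Claim_equal_remove_in_line_strings : Prop := ∀ (line : String), Dom_remove_in_line_strings line → Spec_remove_in_line_strings line (remove_in_line_strings line)

-- ===== LEMMAS AND PROOFS =====

-- the common list of unescaped-quote positions
def quotePos (cs : List Char) : List Int :=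
  (PySem.List.pyRange 0 (cs.length : Int) 1).filter
    (fun i => PySem.List.pyGetD cs i ' ' == '"' && PySem.List.pyGetD cs (i - 1) ' ' != '\\')

-- which indices end up blanked, read off the (sorted) position list two at a time
def cover : List Int → Int → Bool
  | [], _ => false
  | [p], j => decide (p ≤ j)
  | p :: q :: rest, j => (decide (p ≤ j) && decide (j ≤ q)) || cover rest j

-- same, relative to A's del_mode flag
def cover2 : Bool → List Int → Int → Bool
  | false, ps, j => cover ps j
  | true, [], _ => true
  | true, p :: rest, j => decide (j ≤ p) || cover rest j

theorem cover_lt : ∀ (ps : List Int) (j : Int), (∀ x ∈ ps, j < x) → cover ps j = false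
  | [], _, _ => rfl
  | [p], j, h => by
      have := h p (by simp)
      simp [cover]; omega
  | p :: q :: rest, j, h => by
      have h1 := h p (by simp)
      have h2 := h q (by simp)
      have h3 := cover_lt rest j (fun x hx => h x (by simp [hx]))
      simp [cover, h3]; omega

theorem cover2_nil (dm : Bool) (j : Int) : cover2 dm [] j = dm := by
  cases dm <;> rfl

theorem cover2_head (dm : Bool) (p : Int) (rest : List Int)
    (h : ∀ x ∈ rest, p < x) : cover2 dm (p :: rest) p = true := by
  cases dm
  · cases rest with
    | nil => simp [cover2, cover]
    | cons q r =>
        have := h q (by simp)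
        simp [cover2, cover]; omega
  · simp [cover2]

theorem cover2_shift (dm : Bool) (p j : Int) (rest : List Int) (hpj : p < j) :
    cover2 dm (p :: rest) j = cover2 (!dm) rest j := by
  cases dm
  · cases rest with
    | nil => simp [cover2, cover]; omega
    | cons q r => simp [cover2, cover, show p ≤ j by omega]
  · simp [cover2, show ¬(j ≤ p) by omega]

theorem cover2_skip (dm : Bool) (p j : Int) (rest : List Int)
    (hj : j < p) (h : ∀ x ∈ rest, p < x) : cover2 dm (p :: rest) j = dm := by
  cases dm
  · have : ∀ x ∈ p :: rest, j < x := by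
      intro x hx
      rcases List.mem_cons.mp hx with h1 | h2
      · omega
      · have := h x h2; omega
    simpa [cover2] using cover_lt (p :: rest) j this
  · simp [cover2]; omega

-- the invariant of A's second loop: the characters it emits, as a map over the remaining range
theorem loopA_inv (cs : List Char) : ∀ (m : Nat) (j₀ : Int) (ps : List Int) (dm : Bool) (nl : List Char),
    ps.Pairwise (· < ·) → (∀ p ∈ ps, j₀ ≤ p) →
    ((PySem.List.pyRange j₀ (j₀ + (m : Int)) 1).foldl (stepA cs) (ps, dm, nl)).2.2
      = nl ++ (PySem.List.pyRange j₀ (j₀ + (m : Int)) 1).map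
          (fun j => if cover2 dm ps j then '_' else PySem.List.pyGetD cs j ' ') := by
  intro m
  induction m with
  | zero =>
      intro j₀ ps dm nl _ _
      rw [PySem.List.pyRange_one_eq_nil (by omega)]
      simp
  | succ k ih =>
      intro j₀ ps dm nl hpw hge
      have hE : j₀ + ((k + 1 : Nat) : Int) = (j₀ + 1) + (k : Int) := by push_cast; ring
      rw [hE, PySem.List.pyRange_one_cons (by omega), List.foldl_cons, List.map_cons]
      cases ps with
      | nil =>
          cases dm
          · simp only [stepA]
            rw [if_neg (by simp), ih (j₀ + 1) [] false (nl ++ [PySem.List.pyGetD cs j₀ ' ']) (by simp) (by simp)]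
            simp [cover2_nil]
          · simp only [stepA]
            rw [if_pos (by trivial), ih (j₀ + 1) [] true (nl ++ ['_']) (by simp) (by simp)]
            simp [cover2_nil]
      | cons p rest =>
          by_cases hjp : j₀ = p
          · subst hjp
            have hrest : ∀ x ∈ rest, j₀ < x := by
              intro x hx; exact (List.pairwise_cons.mp hpw).1 x hx
            simp only [stepA]
            rw [if_pos (by trivial), ih (j₀ + 1) rest (!dm) (nl ++ ['_']) (List.pairwise_cons.mp hpw).2
                (fun x hx => by have := hrest x hx; omega)]
            rw [List.map_congr_left (fun j hj => by
              have hjm := (PySem.List.mem_pyRange_one.mp hj).1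
              rw [show cover2 (!dm) rest j = cover2 dm (j₀ :: rest) j from
                (cover2_shift dm j₀ j rest (by omega)).symm])]
            rw [cover2_head dm j₀ rest hrest]
            simp
          · have hjlt : j₀ < p := by
              have := hge p (by simp); omega
            have hrest : ∀ x ∈ rest, p < x := (List.pairwise_cons.mp hpw).1
            have hstep : stepA cs (p :: rest, dm, nl) j₀
                = (p :: rest, dm, nl ++ [if dm then '_' else PySem.List.pyGetD cs j₀ ' ']) := by
              cases dm <;> simp [stepA, hjp]
            rw [hstep,
              ih (j₀ + 1) (p :: rest) dm (nl ++ [if dm then '_' else PySem.List.pyGetD cs j₀ ' '])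
                hpw (fun x hx => by
                  rcases List.mem_cons.mp hx with h1 | h2
                  · omega
                  · have := hrest x h2; omega)]
            rw [cover2_skip dm p j₀ rest hjlt hrest]
            cases dm <;> simp

-- A's positions list is quotePos
theorem posA_eq (cs : List Char) :
    (PySem.List.pyRange 0 (cs.length : Int) 1).foldl
      (fun ps i => if PySem.List.pyGetD cs i ' ' == '"' && PySem.List.pyGetD cs (i - 1) ' ' != '\\'
                   then ps ++ [i] else ps) []
    = quotePos cs := by
  rw [PySem.List.foldl_append_if_eq_filter]
  rfl

-- B's positions list is quotePos too
theorem posB_eq (cs : List Char) :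
    ((PySem.List.enumerate cs 0).filter
      (fun pc => pc.2 == '"' && PySem.List.pyGetD cs (pc.1 - 1) ' ' != '\\')).map (·.1)
    = quotePos cs := by
  rw [PySem.List.enumerate_eq_map_pyRange cs ' ', List.filter_map, List.map_map]
  simp only [Function.comp_def]
  simp [quotePos]

theorem quotePos_pairwise (cs : List Char) : (quotePos cs).Pairwise (· < ·) :=
  (PySem.List.pairwise_lt_pyRange_one 0 (cs.length : Int)).filter _

theorem quotePos_mem (cs : List Char) (p : Int) (h : p ∈ quotePos cs) :
    0 ≤ p ∧ p < (cs.length : Int) :=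
  PySem.List.mem_pyRange_one.mp (List.mem_filter.mp h).1

-- the blanking fold preserves length
theorem length_blank_fold (l : List Int) : ∀ (cs : List Char),
    (l.foldl (fun acc i => PySem.List.pySetD acc i '_') cs).length = cs.length := by
  induction l with
  | nil => intro cs; rfl
  | cons x xs ih => intro cs; rw [List.foldl_cons, ih, PySem.List.length_pySetD]

-- pointwise effect of blanking the half-open range [a, c)
theorem blank_fold (k : Nat) : ∀ (cs : List Char) (a c j : Int), (c - a).toNat = k →
    c ≤ (cs.length : Int) → 0 ≤ a → 0 ≤ j → j < (cs.length : Int) →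
    PySem.List.pyGetD ((PySem.List.pyRange a c 1).foldl
        (fun acc i => PySem.List.pySetD acc i '_') cs) j ' '
      = if a ≤ j ∧ j < c then '_' else PySem.List.pyGetD cs j ' ' := by
  induction k with
  | zero =>
      intro cs a c j hk hc ha hj0 hj
      have hca : c ≤ a := by omega
      rw [PySem.List.pyRange_one_eq_nil hca, List.foldl_nil, if_neg (by omega)]
  | succ k ih =>
      intro cs a c j hk hc ha hj0 hj
      have hac : a < c := by omega
      rw [PySem.List.pyRange_one_cons hac, List.foldl_cons]
      rw [ih (PySem.List.pySetD cs a '_') (a + 1) c j (by omega)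
            (by rw [PySem.List.length_pySetD]; omega) (by omega) hj0
            (by rw [PySem.List.length_pySetD]; omega)]
      have haN : ((a.toNat : Nat) : Int) = a := Int.toNat_of_nonneg ha
      have hjN : ((j.toNat : Nat) : Int) = j := Int.toNat_of_nonneg hj0
      rw [← haN, ← hjN, PySem.List.pyGetD_pySetD_natCast cs a.toNat j.toNat '_' ' ' (by omega)]
      rw [haN, hjN]
      split_ifs <;> first | rfl | omega

theorem length_fillPairs (n : Int) : ∀ (ps : List Int) (cs : List Char),
    (fillPairs n ps cs).length = cs.length
  | [], _ => rfl
  | [p], cs => by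
      simp only [fillPairs, blankRange]
      exact length_blank_fold _ cs
  | p :: q :: rest, cs => by
      simp only [fillPairs]
      rw [length_fillPairs n rest _]
      simp only [blankRange]
      exact length_blank_fold _ cs

-- pointwise characterisation of B's region fill
theorem fillPairs_pointwise (n : Int) : ∀ (ps : List Int) (cs : List Char) (j : Int),
    (cs.length : Int) = n → ps.Pairwise (· < ·) → (∀ p ∈ ps, 0 ≤ p ∧ p < n) →
    0 ≤ j → j < n →
    PySem.List.pyGetD (fillPairs n ps cs) j ' '
      = if cover ps j then '_' else PySem.List.pyGetD cs j ' '
  | [], cs, j, _, _, _, _, _ => by simp [fillPairs, cover]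
  | [p], cs, j, hn, _, hmem, hj0, hj => by
      have hp := hmem p (by simp)
      simp only [fillPairs, blankRange]
      rw [blank_fold ((n - 1 + 1 - p).toNat) cs p (n - 1 + 1) j rfl (by omega) (by omega) hj0
            (by omega)]
      simp only [cover, decide_eq_true_eq]
      split_ifs <;> first | rfl | omega
  | p :: q :: rest, cs, j, hn, hpw, hmem, hj0, hj => by
      have hp := hmem p (by simp)
      have hq := hmem q (by simp)
      have hpq : p < q := (List.pairwise_cons.mp hpw).1 q (by simp)
      simp only [fillPairs]
      rw [fillPairs_pointwise n rest (blankRange cs p q) j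
            (by simp only [blankRange]; rw [length_blank_fold]; exact hn)
            ((List.pairwise_cons.mp (List.pairwise_cons.mp hpw).2).2)
            (fun x hx => hmem x (by simp [hx])) hj0 hj]
      simp only [blankRange]
      rw [blank_fold ((q + 1 - p).toNat) cs p (q + 1) j rfl (by omega) (by omega) hj0 (by omega)]
      simp only [cover]
      by_cases hcv : cover rest j = true
      · simp [hcv]
      · simp only [Bool.not_eq_true] at hcv
        simp only [hcv, Bool.or_false, Bool.false_eq_true, if_false, Bool.and_eq_true,
          decide_eq_true_eq]
        split_ifs <;> first | rfl | omega

-- ===== VERDICT (by name: the statement is the Claim_ definition above) =====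
theorem remove_in_line_strings_spec : Claim_equal_remove_in_line_strings := by
  intro line _
  unfold Spec_remove_in_line_strings remove_in_line_strings remove_in_line_strings_alt
  simp only []
  set cs := line.toList with hcs
  congr 1
  rw [posA_eq, posB_eq]
  have hA := loopA_inv cs cs.length 0 (quotePos cs) false []
      (quotePos_pairwise cs) (fun p hp => (quotePos_mem cs p hp).1)
  rw [zero_add] at hA
  rw [hA, List.nil_append]
  apply List.ext_getElem
  · rw [List.length_map, PySem.List.length_pyRange_one, length_fillPairs]
    omega
  · intro i h1 h2
    have hi : (i : Int) < (cs.length : Int) := by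
      have := h2; rw [length_fillPairs] at this; omega
    simp only [List.getElem_map, PySem.List.getElem_pyRange_one, zero_add]
    have hB := fillPairs_pointwise (cs.length : Int) (quotePos cs) cs (i : Int) rfl
        (quotePos_pairwise cs) (fun p hp => quotePos_mem cs p hp) (by omega) hi
    rw [PySem.List.pyGetD_eq_getElem _ ' ' (by omega)
          (by rw [length_fillPairs]; exact_mod_cast hi)] at hB
    simp only [Int.toNat_natCast] at hB
    have hc2 : cover2 false (quotePos cs) (i : Int) = cover (quotePos cs) (i : Int) := rfl
    rw [hc2]
    exact hB.symm
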